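-- pv_equiv track=rewrite | github.com/oosuhada/codetest-study | 프로그래머스/0/120815. 피자 나눠 먹기 （2）/20260413_111440_correct_피자 나눠 먹기 （2）.py | solution
-- ===== SOURCE A (Python) =====
-- def solution(n):
--     answer = 0
--     i = 1
--     #6과 result값의 공배수가 n으로 나눠서 0이 될때 멈춤
--     while i>0: #while 대신 for문을 사용하여 틀림. 두 개념 정확히 구분 필요
--         if i % n == 0 and i % 6 == 0:
--             answer += (i // 6)
--             return answer
--         else:
--             i += 1
-- ===== SOURCE B (Python) =====
-- from math import gcd
--
-- def solution(n):
--     return abs(n) // gcd(n, 6)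
-- ===== Notes on version B (the rewrite author's own statement) =====
-- stated objective: faster
-- what changed: Replaced the linear search for the least common positive multiple of n and 6 by the closed form abs(n)//gcd(n,6).
import Mathlib
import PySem

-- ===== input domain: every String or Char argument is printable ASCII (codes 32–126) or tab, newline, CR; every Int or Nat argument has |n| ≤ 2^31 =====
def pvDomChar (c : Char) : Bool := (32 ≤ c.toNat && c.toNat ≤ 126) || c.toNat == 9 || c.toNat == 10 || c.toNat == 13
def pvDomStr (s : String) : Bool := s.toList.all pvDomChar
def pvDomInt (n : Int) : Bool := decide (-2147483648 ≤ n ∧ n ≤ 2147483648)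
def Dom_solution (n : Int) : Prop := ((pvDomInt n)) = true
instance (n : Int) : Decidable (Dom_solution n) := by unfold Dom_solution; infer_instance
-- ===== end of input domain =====

-- B replaces A's linear search for the least positive common multiple of n and 6
-- by the closed form abs(n) // gcd(n, 6); faster (asymptotic).

-- ===== PORT A =====
-- A's `while i>0` loop searches upward from i = 1 and returns at the first i with
-- i % n == 0 and i % 6 == 0.  The loop is ported with a fuel counter only as a
-- termination device: for every n ≠ 0 the fuel 6*|n| + 6 strictly exceeds the
-- number of iterations Python performs (the loop stops at lcm(|n|,6) ≤ 6|n|),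
-- so the fuel-0 branch is never reached on admitted inputs.
def solutionGo (n : Int) : Nat → Int → Int
  | 0, _ => 0
  | fuel + 1, i =>
    if PySem.Int.mod i n = 0 ∧ PySem.Int.mod i 6 = 0 then
      0 + PySem.Int.floordiv i 6
    else
      solutionGo n fuel (i + 1)

def solution (n : Int) : Int := solutionGo n (6 * n.natAbs + 6) 1

-- ===== PORT B =====
def solution_alt (n : Int) : Int := ((n.natAbs / Int.gcd n 6 : Nat) : Int)

-- ===== PRECONDITION & SPEC =====
-- Pre_ excludes exactly n = 0, where A's `i % n` raises ZeroDivisionError.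
def Pre_solution (n : Int) : Prop := n ≠ 0
instance (n : Int) : Decidable (Pre_solution n) := by unfold Pre_solution; infer_instance
def pvWitness_solution : Int := 7

def Spec_solution (n : Int) (out : Int) : Prop := out = solution_alt n
instance (n : Int) (out : Int) : Decidable (Spec_solution n out) := by unfold Spec_solution; infer_instance

-- ===== CLAIM (what is proved, stated in full; the proofs are below) =====
def Claim_equal_solution : Prop := ∀ (n : Int), Dom_solution n → Pre_solution n → Spec_solution n (solution n)

-- ===== LEMMAS AND PROOFS =====

-- The least positive common multiple of n and 6, as an Int.
def pvL (n : Int) : Int := (Int.lcm n 6 : Int)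

lemma pvL_pos (n : Int) (hn : n ≠ 0) : 0 < pvL n := by
  unfold pvL
  have : Int.lcm n 6 ≠ 0 := by
    simp only [Int.lcm, ne_eq, Nat.lcm_eq_zero_iff, Int.natAbs_eq_zero]
    omega
  exact_mod_cast Nat.pos_of_ne_zero this

lemma pvL_dvd_n (n : Int) : n ∣ pvL n := Int.dvd_lcm_left n 6
lemma pvL_dvd_6 (n : Int) : (6 : Int) ∣ pvL n := Int.dvd_lcm_right n 6

lemma pvL_least (n i : Int) (hi : 0 < i) (h1 : n ∣ i) (h2 : (6 : Int) ∣ i) : pvL n ≤ i := by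
  have ha : n.natAbs ∣ i.natAbs := Int.natAbs_dvd_natAbs.mpr h1
  have hb : (6 : Nat) ∣ i.natAbs := by
    have := Int.natAbs_dvd_natAbs.mpr h2; simpa using this
  have hnat : Nat.lcm n.natAbs 6 ∣ i.natAbs := Nat.lcm_dvd ha hb
  have hdvd : pvL n ∣ i := by
    unfold pvL
    have h1' : ((Int.lcm n 6 : Nat) : Int) ∣ ((i.natAbs : Nat) : Int) :=
      Int.natCast_dvd_natCast.mpr (by simpa [Int.lcm] using hnat)
    exact dvd_trans h1' (Int.natAbs_dvd.mpr dvd_rfl)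
  exact Int.le_of_dvd hi hdvd

-- The loop invariant: starting at 1 ≤ i ≤ L with more fuel than L - i steps,
-- the loop returns L // 6.
lemma solutionGo_eq (n : Int) :
    ∀ (fuel : Nat) (i : Int), 1 ≤ i → i ≤ pvL n → pvL n < i + fuel →
      solutionGo n fuel i = PySem.Int.floordiv (pvL n) 6 := by
  intro fuel
  induction fuel with
  | zero => intro i h1 h2 h3; omega
  | succ f ih =>
    intro i h1 h2 h3
    by_cases hstop : PySem.Int.mod i n = 0 ∧ PySem.Int.mod i 6 = 0
    · have hdn : n ∣ i := (PySem.Int.mod_eq_zero_iff_dvd i n).mp hstop.1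
      have hd6 : (6 : Int) ∣ i := (PySem.Int.mod_eq_zero_iff_dvd i 6).mp hstop.2
      have hle : pvL n ≤ i := pvL_least n i (by omega) hdn hd6
      have hiL : i = pvL n := le_antisymm h2 hle
      subst hiL
      simp only [solutionGo, if_pos hstop, zero_add]
    · have hne : i ≠ pvL n := by
        intro hiL
        exact hstop ⟨(PySem.Int.mod_eq_zero_iff_dvd i n).mpr (hiL ▸ pvL_dvd_n n),
                     (PySem.Int.mod_eq_zero_iff_dvd i 6).mpr (hiL ▸ pvL_dvd_6 n)⟩
      have h2' : i + 1 ≤ pvL n := by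
        rcases lt_or_eq_of_le h2 with h | h
        · omega
        · exact absurd h hne
      simp only [solutionGo, if_neg hstop]
      exact ih (i + 1) (by omega) h2' (by push_cast at h3 ⊢; omega)

lemma pvL_le_six_abs (n : Int) (hn : n ≠ 0) : pvL n ≤ 6 * n.natAbs := by
  have hdvd : pvL n ∣ (n.natAbs : Int) * 6 := by
    unfold pvL
    have : Int.lcm n 6 ∣ n.natAbs * 6 := Nat.lcm_dvd ⟨6, rfl⟩ ⟨n.natAbs, Nat.mul_comm _ _⟩
    exact_mod_cast Int.natCast_dvd_natCast.mpr this
  have hpos : (0 : Int) < (n.natAbs : Int) * 6 := by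
    have : 0 < n.natAbs := Int.natAbs_pos.mpr hn
    positivity
  have := Int.le_of_dvd hpos hdvd
  omega

-- The closed form: lcm(|n|,6)/6 = |n|/gcd(|n|,6) over Nat.
lemma lcm_div_six (a : Nat) : Nat.lcm a 6 / 6 = a / Nat.gcd a 6 := by
  rcases Nat.eq_zero_or_pos a with rfl | ha
  · simp
  have hg : 0 < Nat.gcd a 6 := Nat.gcd_pos_of_pos_left 6 ha
  have hga : Nat.gcd a 6 ∣ a := Nat.gcd_dvd_left a 6
  have hkey : Nat.gcd a 6 * Nat.lcm a 6 = a * 6 := Nat.gcd_mul_lcm a 6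
  obtain ⟨k, hk⟩ := hga
  set g := Nat.gcd a 6 with hgdef
  have hlcm : Nat.lcm a 6 = k * 6 := by
    have : g * Nat.lcm a 6 = g * (k * 6) := by
      rw [hkey, hk]; ring
    exact Nat.eq_of_mul_eq_mul_left hg this
  rw [hlcm, hk, Nat.mul_div_cancel k (by norm_num : 0 < 6),
      Nat.mul_div_cancel_left k hg]

lemma solution_closed (n : Int) (hn : n ≠ 0) : solution n = solution_alt n := by
  have hL1 : 1 ≤ pvL n := pvL_pos n hn
  have hL2 : pvL n ≤ 6 * n.natAbs := pvL_le_six_abs n hn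
  have hrun : solution n = PySem.Int.floordiv (pvL n) 6 := by
    unfold solution
    exact solutionGo_eq n (6 * n.natAbs + 6) 1 le_rfl hL1
      (by push_cast at hL2 ⊢; omega)
  rw [hrun]
  unfold pvL solution_alt
  have : PySem.Int.floordiv ((Int.lcm n 6 : Nat) : Int) ((6 : Nat) : Int)
      = ((Int.lcm n 6 / 6 : Nat) : Int) := PySem.Int.floordiv_natCast _ _
  rw [show ((6:Nat):Int) = (6:Int) from rfl] at this
  rw [this]
  congr 1
  show Int.lcm n 6 / 6 = n.natAbs / Int.gcd n 6
  simp only [Int.lcm, Int.gcd]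
  exact lcm_div_six n.natAbs

-- ===== VERDICT (by name: the statement is the Claim_ definition above) =====
theorem solution_spec : Claim_equal_solution := by
  intro n _ hpre
  unfold Spec_solution
  exact solution_closed n hpre
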